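-- pv_equiv track=rewrite | github.com/jingmouren/cnswd | cnswd/utils.py | to_table_name
-- ===== SOURCE A (Python) =====
-- def to_plural(word):
--     """转换为单词的复数"""
--     word = word.lower()
--     if word.endswith('y'):
--         return word[:-1] + 'ies'
--     elif word[-1] in 'sx' or word[-2:] in ['sh', 'ch']:
--         return word + 'es'
--     elif word.endswith('an'):
--         return word[:-2] + 'en'
--     else:
--         return word + 's'
--
-- def to_table_name(class_name):
--     """
--     将骆峰风格类名称转换为数据库表名称
--
--     Parameters
--     ----------
--     class_name : string
--         骆峰风格类名称
--
--     Returns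
--     -------
--     res : string
--         小写字符名称，除首字符外，大写字符以“_”连接
--         以"_"连接的尾部名词以复数表示
--
--     Example
--     -------
--     >>> to_table_name('ClassName')
--     class_names
--
--     """
--     if not class_name.isidentifier():
--         raise ValueError('无效类名称')
--     # 如果全部为大写，则返回小写复数形式
--     tmp = []
--     for i in range(len(class_name)):
--         tmp.append(class_name[i].isupper())
--     if all(tmp):
--         return to_plural(class_name.lower())
--     res = class_name[0].lower()
--     for i in range(1, len(class_name)):
--         if class_name[i].isupper() and not class_name[i].isdigit():
--             res += '_' + class_name[i].lower()
--         else: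
--             res += class_name[i].lower()
--     parts = res.split('_')
--     parts[-1] = to_plural(parts[-1])
--     return '_'.join(parts)
-- ===== SOURCE B (Python) =====
-- def _plural(w):
--     w = w.lower()
--     if w.endswith('y'):
--         return w[:-1] + 'ies'
--     if w.endswith('an'):
--         return w[:-2] + 'en'
--     if w[-1] in 'sx' or w[-2:] in ('sh', 'ch'):
--         return w + 'es'
--     return w + 's'
--
--
-- def to_table_name(class_name):
--     if not class_name.isidentifier():
--         raise ValueError('无效类名称')
--     if all(c.isupper() for c in class_name):
--         return _plural(class_name.lower())
--     s = class_name.lower()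
--     # word boundaries: position 0, every '_' , and every inner uppercase letter;
--     # each word is the slice of the lowered string between consecutive boundaries,
--     # with the leading character dropped when the boundary is a '_'
--     bounds = [0] + [i for i, c in enumerate(class_name)
--                     if c == '_' or (i > 0 and c.isupper())]
--     bounds.append(len(class_name))
--     words = [s[i + (class_name[i] == '_'):j] for i, j in zip(bounds, bounds[1:])]
--     words[-1] = _plural(words[-1])
--     return '_'.join(words)
-- ===== Notes on version B (the rewrite author's own statement) =====
-- stated objective: alternative
-- what changed: B first computes the list of word-boundary indices (position 0, every '_' and every inner uppercase letter) and then extracts the words directly as slices of the lowered string between consecutive boundaries (dropping the leading character at a '_' boundary), instead of A's character-by-character construction of an underscore-separated snake string followed by a split pass.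
-- outside the precondition, e.g. on to_table_name(''): A raises ValueError, B raises ValueError; on to_table_name('_'): A raises IndexError, B raises IndexError; on to_table_name('A_'): A raises IndexError, B raises IndexError
import Mathlib
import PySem

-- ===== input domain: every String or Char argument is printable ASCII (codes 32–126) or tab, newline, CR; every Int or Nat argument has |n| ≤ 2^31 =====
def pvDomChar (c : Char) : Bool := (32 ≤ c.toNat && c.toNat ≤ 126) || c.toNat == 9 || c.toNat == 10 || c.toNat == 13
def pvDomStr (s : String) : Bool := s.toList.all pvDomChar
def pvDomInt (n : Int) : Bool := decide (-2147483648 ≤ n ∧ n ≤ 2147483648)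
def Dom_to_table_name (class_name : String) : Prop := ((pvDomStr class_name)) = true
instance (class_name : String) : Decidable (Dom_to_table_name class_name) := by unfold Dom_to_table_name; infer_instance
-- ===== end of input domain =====

-- B computes the word-boundary index list first and extracts the words as slices of the
-- lowered string between consecutive boundaries, instead of A's character-by-character
-- snake-string construction followed by a split pass; objective: alternative (not faster).


-- ===== PORT A =====
-- str.isidentifier(), ported by hand; exact on the ASCII domain Dom: [A-Za-z_][A-Za-z0-9_]*
def pyIsidentifier (cs : List Char) : Bool :=
  match cs with
  | [] => false
  | c :: rest => (PySem.Chars.isalpha c || c == '_') && rest.all (fun d => PySem.Chars.isalnum d || d == '_')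

-- to_plural; word[-1] raises IndexError on the empty word (those inputs are outside Pre_),
-- ported with pyGetD and a default that matches no branch
def to_plural (word : List Char) : List Char :=
  let w := PySem.Chars.lower word
  if PySem.Chars.endswith w ['y'] then
    PySem.Chars.slice w none (some (-1)) ++ ['i', 'e', 's']
  else if PySem.Chars.isIn [PySem.List.pyGetD w (-1) ' '] ['s', 'x']
      || [['s', 'h'], ['c', 'h']].contains (PySem.Chars.slice w (some (-2)) none) then
    w ++ ['e', 's']
  else if PySem.Chars.endswith w ['a', 'n'] then
    PySem.Chars.slice w none (some (-2)) ++ ['e', 'n']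
  else
    w ++ ['s']

def to_table_name (class_name : String) : String :=
  let cs := class_name.toList
  if !(pyIsidentifier cs) then ""   -- Python raises ValueError here; excluded by Pre_
  else
    let tmp := (PySem.List.pyRange 0 (PySem.Str.len class_name) 1).foldl
      (fun t i => t ++ [PySem.Chars.isupper (PySem.List.pyGetD cs i ' ')]) []
    if tmp.all id then
      String.ofList (to_plural (PySem.Chars.lower cs))
    else
      let res := (PySem.List.pyRange 1 (PySem.Str.len class_name) 1).foldl
        (fun r i =>
          let c := PySem.List.pyGetD cs i ' '
          if PySem.Chars.isupper c && !(PySem.Chars.isdigit c) then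
            r ++ ['_', PySem.Chars.lowerChar c]
          else
            r ++ [PySem.Chars.lowerChar c])
        [PySem.Chars.lowerChar (PySem.List.pyGetD cs 0 ' ')]
      let parts := PySem.Chars.splitOn res ['_']
      let parts2 := parts.dropLast ++ [to_plural (PySem.List.pyGetD parts (-1) [])]
      String.ofList (PySem.Chars.join ['_'] parts2)

-- ===== PORT B =====
-- B's plural helper: tests the 'an' rule before the s/x/sh/ch rule (the two are disjoint)
def pluralAlt (word : List Char) : List Char :=
  let w := PySem.Chars.lower word
  if PySem.Chars.endswith w ['y'] then
    PySem.Chars.slice w none (some (-1)) ++ ['i', 'e', 's']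
  else if PySem.Chars.endswith w ['a', 'n'] then
    PySem.Chars.slice w none (some (-2)) ++ ['e', 'n']
  else if PySem.Chars.isIn [PySem.List.pyGetD w (-1) ' '] ['s', 'x']
      || [['s', 'h'], ['c', 'h']].contains (PySem.Chars.slice w (some (-2)) none) then
    w ++ ['e', 's']
  else
    w ++ ['s']

def to_table_name_alt (class_name : String) : String :=
  let cs := class_name.toList
  if !(pyIsidentifier cs) then ""   -- Python raises ValueError here; excluded by Pre_
  else if cs.all PySem.Chars.isupper then
    String.ofList (pluralAlt (PySem.Chars.lower cs))
  else
    let s := PySem.Chars.lower cs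
    -- bounds = [0] + [i for i, c in enumerate(class_name) if c == '_' or (i > 0 and c.isupper())]
    let bounds := 0 :: ((PySem.List.enumerate cs 0).filter
        (fun ic => ic.2 == '_' || (decide (0 < ic.1) && PySem.Chars.isupper ic.2))).map Prod.fst
    -- bounds.append(len(class_name))
    let bounds := bounds ++ [PySem.Str.len class_name]
    -- words = [s[i + (class_name[i] == '_'):j] for i, j in zip(bounds, bounds[1:])]
    let words := (bounds.zip bounds.tail).map
      (fun bj => PySem.Chars.slice s
        (some (bj.1 + (if PySem.List.pyGetD cs bj.1 ' ' == '_' then 1 else 0)))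
        (some bj.2))
    let words2 := words.dropLast ++ [pluralAlt (PySem.List.pyGetD words (-1) [])]
    String.ofList (PySem.Chars.join ['_'] words2)

-- ===== PRECONDITION & SPEC =====
-- Pre_ excludes exactly the inputs on which Python A raises: non-identifiers (ValueError)
-- and identifiers ending in '_' (to_plural('') raises IndexError); B raises identically there.
def Pre_to_table_name (class_name : String) : Prop :=
  pyIsidentifier class_name.toList = true ∧ class_name.toList.getLast? ≠ some '_'
instance (class_name : String) : Decidable (Pre_to_table_name class_name) := by
  unfold Pre_to_table_name; infer_instance

def pvWitness_to_table_name : String := "ClassName"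

def Spec_to_table_name (class_name : String) (out : String) : Prop := out = to_table_name_alt class_name
instance (class_name : String) (out : String) : Decidable (Spec_to_table_name class_name out) := by
  unfold Spec_to_table_name; infer_instance

-- ===== CLAIM (what is proved, stated in full; the proofs are below) =====
def Claim_equal_to_table_name : Prop := ∀ (class_name : String), Dom_to_table_name class_name → Pre_to_table_name class_name → Spec_to_table_name class_name (to_table_name class_name)

-- ===== LEMMAS AND PROOFS =====

-- reference splitter: Python s.split('_') as a left recursion
def splitU : List Char → List (List Char)
  | [] => [[]]
  | c :: rest =>
    if c = '_' then [] :: splitU rest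
    else (c :: (splitU rest).headD []) :: (splitU rest).tail

lemma splitU_ne_nil (l : List Char) : splitU l ≠ [] := by
  cases l <;> simp [splitU] <;> split <;> simp

lemma splitU_head_tail (l : List Char) : (splitU l).headD [] :: (splitU l).tail = splitU l := by
  rcases h : splitU l with _ | ⟨a, t⟩
  · exact absurd h (splitU_ne_nil l)
  · simp

lemma go_eq (fuel : Nat) : ∀ (l cur : List Char) (acc : List (List Char)), l.length ≤ fuel →
    PySem.Chars.splitOn.go ['_'] fuel l cur acc
      = acc.reverse ++ ((cur.reverse ++ (splitU l).headD []) :: (splitU l).tail) := by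
  induction fuel with
  | zero =>
    intro l cur acc h
    have : l = [] := by simpa using List.length_eq_zero_iff.mp (Nat.le_zero.mp h)
    subst this
    simp [PySem.Chars.splitOn.go, splitU]
  | succ n ih =>
    intro l cur acc h
    cases l with
    | nil => simp [PySem.Chars.splitOn.go, splitU]
    | cons c rest =>
      by_cases hc : c = '_'
      · subst hc
        rw [PySem.Chars.splitOn.go]
        rw [if_pos (by simp [List.isPrefixOf])]
        rw [ih _ _ _ (by simpa using Nat.le_of_succ_le_succ h)]
        simp only [splitU, if_pos rfl, List.reverse_cons, List.append_assoc,
          List.singleton_append, List.headD_nil, List.tail_cons, List.append_nil]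
        simp
        simpa [List.headD_eq_head?_getD] using splitU_head_tail rest
      · rw [PySem.Chars.splitOn.go]
        rw [if_neg (by simp; exact fun h' => hc h'.symm)]
        rw [ih _ _ _ (by simpa using Nat.le_of_succ_le_succ h)]
        simp [splitU, hc]

lemma splitOn_eq_splitU (s : List Char) : PySem.Chars.splitOn s ['_'] = splitU s := by
  rw [PySem.Chars.splitOn, go_eq (s.length + 1) s [] [] (by omega)]
  simpa using splitU_head_tail s

lemma splitU_append_us (r : List Char) : splitU (r ++ ['_']) = splitU r ++ [[]] := by
  induction r with
  | nil => simp [splitU]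
  | cons c r ih =>
    by_cases hc : c = '_'
    · subst hc; simp [splitU, ih]
    · simp only [List.cons_append, splitU, if_neg hc, ih]
      rcases h : splitU r with _ | ⟨a, t⟩
      · exact absurd h (splitU_ne_nil r)
      · simp

lemma splitU_append_ch (r : List Char) (y : Char) (hy : y ≠ '_') :
    splitU (r ++ [y]) = (splitU r).dropLast ++ [(splitU r).getLastD [] ++ [y]] := by
  induction r with
  | nil => simp [splitU, hy]
  | cons c r ih =>
    by_cases hc : c = '_'
    · subst hc
      simp only [List.cons_append, splitU, if_pos rfl, ih]
      rcases h : splitU r with _ | ⟨a, t⟩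
      · exact absurd h (splitU_ne_nil r)
      · simp
    · simp only [List.cons_append, splitU, if_neg hc, ih]
      rcases h : splitU r with _ | ⟨a, t⟩
      · exact absurd h (splitU_ne_nil r)
      · cases t <;> simp

lemma splitU_append_two (r : List Char) (y : Char) (hy : y ≠ '_') :
    splitU (r ++ ['_', y]) = splitU r ++ [[y]] := by
  have : r ++ ['_', y] = (r ++ ['_']) ++ [y] := by simp
  rw [this, splitU_append_ch _ _ hy, splitU_append_us]
  simp

lemma upper_bounds (c : Char) (h : PySem.Chars.isupper c = true) :
    65 ≤ c.toNat ∧ c.toNat ≤ 90 := by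
  simp [PySem.Chars.isupper, Char.le_def, UInt32.le_iff_toNat_le] at h
  exact h

lemma upper_not_digit (c : Char) (h : PySem.Chars.isupper c = true) :
    PySem.Chars.isdigit c = false := by
  have := upper_bounds c h
  simp [PySem.Chars.isdigit, Char.le_def, UInt32.le_iff_toNat_le]
  intro h1
  omega

lemma lowerChar_of_upper_ne_us (c : Char) (h : PySem.Chars.isupper c = true) :
    PySem.Chars.lowerChar c ≠ '_' := by
  have hb := upper_bounds c h
  simp [PySem.Chars.lowerChar, h]
  intro heq
  have := congrArg Char.toNat heq
  rw [Char.toNat_ofNat] at this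
  rw [if_pos (by left; omega)] at this
  rw [show ('_').toNat = 95 from rfl] at this
  omega

lemma lowerChar_of_not_upper (c : Char) (h : PySem.Chars.isupper c = false) :
    PySem.Chars.lowerChar c = c := by
  simp [PySem.Chars.lowerChar, h]

-- the per-character step of A's snake-string loop
def fA (r : List Char) (c : Char) : List Char :=
  if PySem.Chars.isupper c && !(PySem.Chars.isdigit c) then r ++ ['_', PySem.Chars.lowerChar c]
  else r ++ [PySem.Chars.lowerChar c]

-- A's snake string for a nonempty class name
def resOf : List Char → List Char
  | [] => []
  | c0 :: rest => rest.foldl fA [PySem.Chars.lowerChar c0]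

-- B's boundary predicate and boundary-index list
def bndP (ic : Int × Char) : Bool := ic.2 == '_' || (decide (0 < ic.1) && PySem.Chars.isupper ic.2)

def Fb (cs : List Char) : List Int := ((PySem.List.enumerate cs 0).filter bndP).map Prod.fst

-- B's word extraction, written as a recursion over the inner boundary list
def sliceWord (cs : List Char) (a b : Int) : List Char :=
  PySem.Chars.slice (PySem.Chars.lower cs)
    (some (a + (if PySem.List.pyGetD cs a ' ' == '_' then 1 else 0))) (some b)

def wordsFrom (cs : List Char) (a : Int) : List Int → List (List Char)
  | [] => [sliceWord cs a (cs.length : Int)]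
  | b :: bs => sliceWord cs a b :: wordsFrom cs b bs

lemma wordsFrom_ne_nil (cs : List Char) (a : Int) (T : List Int) : wordsFrom cs a T ≠ [] := by
  cases T <;> simp [wordsFrom]

-- B's zip-of-adjacent-bounds map equals the recursion wordsFrom
lemma zip_map_eq_wordsFrom (cs : List Char) : ∀ (T : List Int) (a : Int),
    ((((a :: T) ++ [(cs.length : Int)]).zip (T ++ [(cs.length : Int)])).map
      (fun bj => PySem.Chars.slice (PySem.Chars.lower cs)
        (some (bj.1 + (if PySem.List.pyGetD cs bj.1 ' ' == '_' then 1 else 0)))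
        (some bj.2)))
      = wordsFrom cs a T := by
  intro T
  induction T with
  | nil => intro a; simp [wordsFrom, sliceWord]
  | cons b bs ih =>
    intro a
    have h := ih b
    simp only [List.cons_append] at h ⊢
    simp only [List.zip_cons_cons, List.map_cons, wordsFrom]
    refine congrArg₂ List.cons rfl ?_
    simpa using h

lemma endswith_pair_iff (v : List Char) (a b : Char) :
    PySem.Chars.endswith v [a, b] = true ↔ ∃ pre, v = pre ++ [a, b] := by
  rw [PySem.Chars.endswith_iff]
  constructor
  · rintro ⟨pre, rfl⟩; exact ⟨pre, rfl⟩
  · rintro ⟨pre, rfl⟩; exact ⟨pre, rfl⟩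

-- A's sx/sh/ch test and the 'an' test are mutually exclusive
lemma an_excludes_sxshch (w : List Char) (h : PySem.Chars.endswith w ['a', 'n'] = true) :
    (PySem.Chars.isIn [PySem.List.pyGetD w (-1) ' '] ['s', 'x']
      || [['s', 'h'], ['c', 'h']].contains (PySem.Chars.slice w (some (-2)) none)) = false := by
  obtain ⟨pre, rfl⟩ := (endswith_pair_iff w 'a' 'n').mp h
  have h1 : PySem.List.pyGetD (pre ++ ['a', 'n']) (-1) ' ' = 'n' := by
    rw [show pre ++ ['a', 'n'] = (pre ++ ['a']) ++ ['n'] by simp,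
      PySem.List.pyGetD_neg_one_append_singleton]
  have h2 : PySem.Chars.slice (pre ++ ['a', 'n']) (some (-2)) none = ['a', 'n'] := by
    simp only [PySem.Chars.slice_eq_listSlice]
    rw [PySem.List.slice_from_neg_ofNat _ 2 (by omega)]
    simp
  rw [h1, h2]
  decide

-- A's plural helper equals B's (branch order differs only on disjoint branches)
lemma plural_eq (word : List Char) : to_plural word = pluralAlt word := by
  unfold to_plural pluralAlt
  simp only []
  by_cases hy : PySem.Chars.endswith (PySem.Chars.lower word) ['y'] = true
  · rw [if_pos hy, if_pos hy]
  · rw [if_neg hy, if_neg hy]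
    by_cases han : PySem.Chars.endswith (PySem.Chars.lower word) ['a', 'n'] = true
    · rw [an_excludes_sxshch _ han]
      simp only [Bool.false_eq_true, if_false, if_pos han]
    · rw [if_neg han, if_neg han]

lemma tmp_all (cs : List Char) :
    ((PySem.List.pyRange 0 (cs.length : Int) 1).foldl
      (fun t i => t ++ [PySem.Chars.isupper (PySem.List.pyGetD cs i ' ')]) []).all id
      = cs.all PySem.Chars.isupper := by
  rw [PySem.List.foldl_append_singleton_eq_map]
  have h := congrArg (List.map PySem.Chars.isupper) (PySem.List.map_pyGetD_pyRange_zero' cs ' ')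
  rw [List.map_map] at h
  simp only [Function.comp_def] at h
  rw [h]
  simp [List.all_map, Function.comp]

lemma resA (cs : List Char) (init : List Char) :
    (PySem.List.pyRange 1 (cs.length : Int) 1).foldl
      (fun r i =>
        if PySem.Chars.isupper (PySem.List.pyGetD cs i ' ')
            && !(PySem.Chars.isdigit (PySem.List.pyGetD cs i ' ')) then
          r ++ ['_', PySem.Chars.lowerChar (PySem.List.pyGetD cs i ' ')]
        else r ++ [PySem.Chars.lowerChar (PySem.List.pyGetD cs i ' ')]) init
      = (cs.drop 1).foldl fA init := by
  have h := PySem.List.foldl_pyRange_pyGetD' cs ' ' fA init (a := 1) (by omega)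
  simpa [fA] using h

-- lower distributes over append (Chars.lower is a map)
lemma lower_append (xs ys : List Char) :
    PySem.Chars.lower (xs ++ ys) = PySem.Chars.lower xs ++ PySem.Chars.lower ys := by
  simp [PySem.Chars.lower]

lemma length_lower (xs : List Char) : (PySem.Chars.lower xs).length = xs.length := by
  simp [PySem.Chars.lower]

-- stability of slices and indexing under appending one character
lemma slice_append_stable (s : List Char) (x : Char) (a b : Int)
    (ha : 0 ≤ a) (hb : 0 ≤ b) (hbn : b ≤ (s.length : Int)) :
    PySem.List.slice (s ++ [x]) (some a) (some b) = PySem.List.slice s (some a) (some b) := by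
  rw [PySem.List.slice_toNat (s ++ [x]) ha hb, PySem.List.slice_toNat s ha hb]
  by_cases hab : a.toNat ≤ s.length
  · rw [List.drop_append_of_le_length hab,
      List.take_append_of_le_length (by simp; omega)]
  · rw [List.drop_eq_nil_of_le (by omega : s.length ≤ a.toNat),
      List.drop_eq_nil_of_le (by simp; omega : (s ++ [x]).length ≤ a.toNat)]

lemma slice_append_last (s : List Char) (x : Char) (a : Int)
    (ha : 0 ≤ a) (han : a ≤ (s.length : Int)) :
    PySem.List.slice (s ++ [x]) (some a) (some ((s.length : Int) + 1))
      = PySem.List.slice s (some a) (some (s.length : Int)) ++ [x] := by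
  rw [PySem.List.slice_toNat (s ++ [x]) ha (by omega), PySem.List.slice_toNat s ha (by omega)]
  have ha' : a.toNat ≤ s.length := by omega
  rw [List.drop_append_of_le_length ha',
    List.take_of_length_le (by simp; omega)]
  rw [List.take_of_length_le (by simp)]

lemma pyGetD_append_stable (cs : List Char) (c : Char) (i : Int)
    (h0 : 0 ≤ i) (hn : i < (cs.length : Int)) :
    PySem.List.pyGetD (cs ++ [c]) i ' ' = PySem.List.pyGetD cs i ' ' := by
  rw [PySem.List.pyGetD_eq_getElem _ _ h0 (by simp; omega),
      PySem.List.pyGetD_eq_getElem _ _ h0 (by simpa using hn)]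
  exact List.getElem_append_left (by omega)

-- sliceWord ignores the appended character when both bounds stay inside cs
lemma sliceWord_append_stable (cs : List Char) (c : Char) (a b : Int)
    (ha0 : 0 ≤ a) (han : a < (cs.length : Int)) (hb0 : 0 ≤ b) (hbn : b ≤ (cs.length : Int)) :
    sliceWord (cs ++ [c]) a b = sliceWord cs a b := by
  unfold sliceWord
  rw [pyGetD_append_stable cs c a ha0 han]
  simp only [PySem.Chars.slice_eq_listSlice, lower_append]
  have : PySem.Chars.lower [c] = [PySem.Chars.lowerChar c] := by simp [PySem.Chars.lower]
  rw [this]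
  exact slice_append_stable _ _ _ _ (by split <;> omega) hb0 (by rw [length_lower]; exact hbn)

-- appending a non-boundary character extends the last word
lemma wordsFrom_append_ch (cs : List Char) (c : Char) :
    ∀ (T : List Int) (a : Int), 0 ≤ a → a < (cs.length : Int) →
    (∀ b ∈ T, 0 ≤ b ∧ b < (cs.length : Int)) →
    wordsFrom (cs ++ [c]) a T
      = (wordsFrom cs a T).dropLast ++ [(wordsFrom cs a T).getLastD [] ++ [PySem.Chars.lowerChar c]] := by
  intro T
  induction T with
  | nil =>
    intro a ha0 han _
    simp only [wordsFrom, List.dropLast, List.getLastD, List.nil_append]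
    unfold sliceWord
    rw [pyGetD_append_stable cs c a ha0 han]
    simp only [PySem.Chars.slice_eq_listSlice, lower_append,
      show PySem.Chars.lower [c] = [PySem.Chars.lowerChar c] from rfl]
    have hlen : ((cs ++ [c]).length : Int) = ((PySem.Chars.lower cs).length : Int) + 1 := by
      rw [length_lower]; simp
    have hlen2 : ((cs.length : Nat) : Int) = ((PySem.Chars.lower cs).length : Int) := by
      rw [length_lower]
    rw [hlen, hlen2]
    rw [slice_append_last (PySem.Chars.lower cs) (PySem.Chars.lowerChar c) _
      (by split <;> omega) (by rw [length_lower]; split <;> omega)]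
    simp
  | cons b bs ih =>
    intro a ha0 han hT
    have hb := hT b (by simp)
    simp only [wordsFrom]
    rw [sliceWord_append_stable cs c a b ha0 han hb.1 (le_of_lt hb.2)]
    rw [ih b hb.1 hb.2 (fun x hx => hT x (by simp [hx]))]
    have hne := wordsFrom_ne_nil cs b bs
    rcases h : wordsFrom cs b bs with _ | ⟨w, ws⟩
    · exact absurd h hne
    · simp

-- the new final word created by a boundary character
lemma sliceWord_last (cs : List Char) (c : Char) :
    sliceWord (cs ++ [c]) (cs.length : Int) (((cs ++ [c]).length : Int))
      = if c = '_' then [] else [PySem.Chars.lowerChar c] := by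
  unfold sliceWord
  have hget : PySem.List.pyGetD (cs ++ [c]) (cs.length : Int) ' ' = c := by
    rw [PySem.List.pyGetD_eq_getElem _ _ (by omega) (by simp)]
    simp
  rw [hget]
  simp only [PySem.Chars.slice_eq_listSlice, lower_append,
    show PySem.Chars.lower [c] = [PySem.Chars.lowerChar c] from rfl]
  have hlen : (((cs ++ [c]).length : Nat) : Int) = (cs.length : Int) + 1 := by simp
  rw [hlen]
  by_cases hc : c = '_'
  · rw [if_pos (by simp [hc]), if_pos hc]
    rw [PySem.List.slice_toNat _ (by omega) (by omega)]
    simp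
  · rw [if_neg (by simp [hc]), if_neg hc]
    rw [PySem.List.slice_toNat _ (by omega) (by omega)]
    have : ((cs.length : Int) + 0).toNat = (PySem.Chars.lower cs).length := by
      rw [length_lower]; omega
    rw [this, List.drop_append_of_le_length le_rfl]
    simp
    rw [length_lower]
    omega

-- appending a boundary character adds a new word
lemma wordsFrom_append_bnd (cs : List Char) (c : Char)
    (hc : c = '_' ∨ PySem.Chars.isupper c = true) :
    ∀ (T : List Int) (a : Int), 0 ≤ a → a < (cs.length : Int) →
    (∀ b ∈ T, 0 ≤ b ∧ b < (cs.length : Int)) →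
    wordsFrom (cs ++ [c]) a (T ++ [(cs.length : Int)])
      = wordsFrom cs a T ++ [if c = '_' then [] else [PySem.Chars.lowerChar c]] := by
  intro T
  induction T with
  | nil =>
    intro a ha0 han _
    simp only [List.nil_append, wordsFrom]
    rw [sliceWord_append_stable cs c a _ ha0 han (by omega) (by omega)]
    congr 1
    rw [sliceWord_last]
    rfl
  | cons b bs ih =>
    intro a ha0 han hT
    have hb := hT b (by simp)
    simp only [List.cons_append, wordsFrom]
    rw [sliceWord_append_stable cs c a b ha0 han hb.1 (le_of_lt hb.2)]
    rw [ih b hb.1 hb.2 (fun x hx => hT x (by simp [hx]))]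

-- every boundary index lies in [0, |cs|)
lemma Fb_mem_range (cs : List Char) : ∀ b ∈ Fb cs, 0 ≤ b ∧ b < (cs.length : Int) := by
  intro b hb
  unfold Fb at hb
  obtain ⟨ic, hic, rfl⟩ := List.mem_map.mp hb
  obtain ⟨k, hk, rfl⟩ := (PySem.List.mem_enumerate_iff cs 0 ic).mp (List.mem_of_mem_filter hic)
  simp
  omega

lemma Fb_append (cs : List Char) (c : Char) (h : cs ≠ []) :
    Fb (cs ++ [c]) = Fb cs
      ++ (if c = '_' ∨ PySem.Chars.isupper c = true then [(cs.length : Int)] else []) := by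
  unfold Fb
  rw [PySem.List.enumerate_append, List.filter_append, List.map_append]
  congr 1
  have hpos : (0 : Int) < (cs.length : Int) := by
    have := List.length_pos_iff.mpr h; omega
  by_cases hc : c = '_' ∨ PySem.Chars.isupper c = true
  · rw [if_pos hc]
    have hP : bndP ((cs.length : Int), c) = true := by
      unfold bndP
      rcases hc with rfl | hu
      · simp
      · simp [hu]
        omega
    simp [PySem.List.enumerate, hP]
  · rw [if_neg hc]
    have hc1 : c ≠ '_' := fun h => hc (Or.inl h)
    have hc2 : PySem.Chars.isupper c = false := by
      rcases Bool.eq_false_or_eq_true (PySem.Chars.isupper c) with h | h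
      · exact absurd (Or.inr h) hc
      · exact h
    have hP : bndP ((cs.length : Int), c) = false := by
      unfold bndP
      simp [hc1, hc2]
    simp [PySem.List.enumerate, hP]

-- A's snake string grows by one fA step per appended character
lemma resOf_append (c0 : Char) (rest : List Char) (c : Char) :
    resOf ((c0 :: rest) ++ [c]) = fA (resOf (c0 :: rest)) c := by
  simp [resOf, List.foldl_append]

-- main invariant: B's word list is the split of A's snake string
lemma words_eq_splitU : ∀ (cs : List Char), cs ≠ [] →
    wordsFrom cs 0 (Fb cs) = splitU (resOf cs) := by
  intro cs
  induction cs using List.reverseRecOn with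
  | nil => intro h; exact absurd rfl h
  | append_singleton cs c ih =>
    intro _
    by_cases hcs : cs = []
    · subst hcs
      simp only [List.nil_append]
      by_cases hc : c = '_'
      · subst hc; decide
      · have hFb : Fb [c] = [] := by
          unfold Fb bndP
          simp [PySem.List.enumerate, hc]
        have hlc : PySem.Chars.lowerChar c ≠ '_' := by
          by_cases hu : PySem.Chars.isupper c = true
          · exact lowerChar_of_upper_ne_us c hu
          · rw [lowerChar_of_not_upper c (by simpa using hu)]; exact hc
        rw [hFb]
        unfold wordsFrom sliceWord resOf
        rw [PySem.List.pyGetD_zero_cons, if_neg (by simp [hc])]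
        simp only [List.foldl_nil, splitU, if_neg hlc, PySem.Chars.slice_eq_listSlice]
        rw [PySem.List.slice_toNat _ (by omega) (by omega)]
        simp [PySem.Chars.lower]
    · have hpos : (0 : Int) < (cs.length : Int) := by
        have := List.length_pos_iff.mpr hcs; omega
      have hres : resOf (cs ++ [c]) = fA (resOf cs) c := by
        rcases cs with _ | ⟨c0, rest⟩
        · exact absurd rfl hcs
        · exact resOf_append c0 rest c
      rw [Fb_append cs c hcs, hres]
      by_cases hb : c = '_' ∨ PySem.Chars.isupper c = true
      · rw [if_pos hb]
        rw [wordsFrom_append_bnd cs c hb (Fb cs) 0 le_rfl hpos (Fb_mem_range cs)]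
        rw [ih hcs]
        by_cases hc : c = '_'
        · subst hc
          rw [if_pos rfl]
          have : fA (resOf cs) '_' = resOf cs ++ ['_'] := by
            unfold fA
            rw [if_neg (by decide)]
            rfl
          rw [this, splitU_append_us]
        · have hu : PySem.Chars.isupper c = true := hb.resolve_left hc
          rw [if_neg hc]
          have : fA (resOf cs) c = resOf cs ++ ['_', PySem.Chars.lowerChar c] := by
            unfold fA
            rw [if_pos (by rw [hu, upper_not_digit c hu]; rfl)]
          rw [this, splitU_append_two _ _ (lowerChar_of_upper_ne_us c hu)]
      · rw [if_neg hb, List.append_nil]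
        have hb1 : c ≠ '_' := fun h => hb (Or.inl h)
        have hu : PySem.Chars.isupper c = false := by
          rcases Bool.eq_false_or_eq_true (PySem.Chars.isupper c) with h | h
          · exact absurd (Or.inr h) hb
          · exact h
        rw [wordsFrom_append_ch cs c (Fb cs) 0 le_rfl hpos (Fb_mem_range cs)]
        rw [ih hcs]
        have hfa : fA (resOf cs) c = resOf cs ++ [PySem.Chars.lowerChar c] := by
          simp [fA, hu]
        rw [hfa, splitU_append_ch _ _ (by rw [lowerChar_of_not_upper c hu]; exact hb1)]

-- ===== VERDICT (by name: the statement is the Claim_ definition above) =====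
theorem to_table_name_spec : Claim_equal_to_table_name := by
  intro s hdom hpre
  obtain ⟨hid, hlast⟩ := hpre
  unfold Spec_to_table_name to_table_name to_table_name_alt
  simp only [PySem.Str.len_eq]
  rw [hid]
  simp only [Bool.not_true, Bool.false_eq_true, if_false]
  rw [tmp_all s.toList]
  by_cases hall : s.toList.all PySem.Chars.isupper = true
  · rw [if_pos hall, if_pos hall, plural_eq]
  · rw [if_neg hall, if_neg hall]
    have hne : s.toList ≠ [] := by
      intro h
      rw [h] at hid
      simp [pyIsidentifier] at hid
    -- A side: the snake-string fold and its split
    rcases hcs : s.toList with _ | ⟨c0, rest⟩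
    · exact absurd hcs hne
    · rw [resA, PySem.List.pyGetD_zero_cons,
        show List.drop 1 (c0 :: rest) = rest from rfl, splitOn_eq_splitU]
      -- B side: the zip of adjacent bounds is wordsFrom, which is the same split
      rw [show (fun ic : Int × Char => ic.2 == '_' || (decide (0 < ic.1) && PySem.Chars.isupper ic.2)) = bndP from rfl]
      rw [show ((PySem.List.enumerate (c0 :: rest) 0).filter bndP).map Prod.fst
            = Fb (c0 :: rest) from rfl]
      rw [show ((0 :: Fb (c0 :: rest)) ++ [((c0 :: rest).length : Int)]).tail
            = Fb (c0 :: rest) ++ [((c0 :: rest).length : Int)] from rfl]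
      rw [zip_map_eq_wordsFrom (c0 :: rest) (Fb (c0 :: rest)) 0]
      rw [words_eq_splitU (c0 :: rest) (by simp)]
      rw [show resOf (c0 :: rest) = rest.foldl fA [PySem.Chars.lowerChar c0] from rfl]
      rw [plural_eq]
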